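-- pv_equiv track=rewrite | github.com/mairabies/CRACKED-CASE | submission/agent_utils.py | separated_components
-- ===== SOURCE A (Python) =====
-- from typing import Tuple, List, Optional
--
-- HEIGHT = 18
--
-- WIDTH = 20
--
-- def torus_wrap(pos: Tuple[int, int]) -> Tuple[int, int]:
--     """Normalize coordinates with torus wrapping."""
--     x, y = pos
--     return (x % WIDTH, y % HEIGHT)
--
-- def neighbors(pos: Tuple[int, int], grid: List[List[int]]) -> List[Tuple[int, int]]:
--     """
--     Get valid adjacent coordinates with torus wrapping.
--
--     Args:
--         pos: Current position (x, y)
--         grid: Board grid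
--
--     Returns:
--         List of valid neighbor positions
--     """
--     x, y = pos
--     candidates = [
--         ((x + 1) % WIDTH, y),
--         ((x - 1) % WIDTH, y),
--         (x, (y + 1) % HEIGHT),
--         (x, (y - 1) % HEIGHT)
--     ]
--     return candidates
--
-- def separated_components(grid: List[List[int]], my_pos: Tuple[int, int], opp_pos: Tuple[int, int], my_trail: List[Tuple[int, int]], opp_trail: List[Tuple[int, int]]) -> bool:
--     """
--     Check if players are in disconnected regions using BFS.
--
--     Args:
--         grid: Current board state
--         my_pos: My position
--         opp_pos: Opponent position
--         my_trail: My trail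
--         opp_trail: Opponent trail
--
--     Returns:
--         True if players are in separate connected components
--     """
--     from collections import deque
--
--     visited = set()
--     queue = deque([my_pos])
--     visited.add(torus_wrap(my_pos))
--
--     # BFS from my position - only traverse empty cells
--     while queue:
--         pos = queue.popleft()
--         for neighbor in neighbors(pos, grid):
--             wrapped = torus_wrap(neighbor)
--             if wrapped not in visited:
--                 x, y = wrapped
--                 # Check if this cell is empty (not occupied by any trail)
--                 if grid[y][x] == 0:  # EMPTY
--                     visited.add(wrapped)
--                     queue.append(wrapped)
--
--     # Check if opponent position is reachable
--     opp_wrapped = torus_wrap(opp_pos)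
--     return opp_wrapped not in visited
-- ===== SOURCE B (Python) =====
-- from typing import Tuple, List
--
-- def separated_components(grid: List[List[int]], my_pos: Tuple[int, int], opp_pos: Tuple[int, int], my_trail: List[Tuple[int, int]], opp_trail: List[Tuple[int, int]]) -> bool:
--     """Recursive depth-first flood fill instead of A's iterative BFS queue:
--     the visited region is grown by recursion on each newly discovered empty
--     cell, not by a FIFO worklist."""
--     W, H = 20, 18
--     visited = {(my_pos[0] % W, my_pos[1] % H)}
--
--     def flood(pos):
--         x, y = pos
--         for nx, ny in [((x + 1) % W, y), ((x - 1) % W, y),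
--                        (x, (y + 1) % H), (x, (y - 1) % H)]:
--             w = (nx % W, ny % H)
--             if w not in visited and grid[w[1]][w[0]] == 0:
--                 visited.add(w)
--                 flood(w)
--
--     flood(my_pos)
--     return (opp_pos[0] % W, opp_pos[1] % H) not in visited
-- ===== Notes on version B (the rewrite author's own statement) =====
-- stated objective: alternative
-- what changed: Replaces A's iterative FIFO BFS (deque worklist + visited set) by a recursive depth-first flood fill that grows the visited region by recursion on each newly discovered empty cell. Pre_ admits the closed-form region where every cell access A can attempt is in bounds (wrapped neighbors of the start, and of every stored empty torus cell that touches the start or another empty cell, all lie inside the grid); outside it A generally raises IndexError, though the closed form necessarily also excludes some returning inputs with unreachable empty cells at the board edge.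
import Mathlib
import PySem

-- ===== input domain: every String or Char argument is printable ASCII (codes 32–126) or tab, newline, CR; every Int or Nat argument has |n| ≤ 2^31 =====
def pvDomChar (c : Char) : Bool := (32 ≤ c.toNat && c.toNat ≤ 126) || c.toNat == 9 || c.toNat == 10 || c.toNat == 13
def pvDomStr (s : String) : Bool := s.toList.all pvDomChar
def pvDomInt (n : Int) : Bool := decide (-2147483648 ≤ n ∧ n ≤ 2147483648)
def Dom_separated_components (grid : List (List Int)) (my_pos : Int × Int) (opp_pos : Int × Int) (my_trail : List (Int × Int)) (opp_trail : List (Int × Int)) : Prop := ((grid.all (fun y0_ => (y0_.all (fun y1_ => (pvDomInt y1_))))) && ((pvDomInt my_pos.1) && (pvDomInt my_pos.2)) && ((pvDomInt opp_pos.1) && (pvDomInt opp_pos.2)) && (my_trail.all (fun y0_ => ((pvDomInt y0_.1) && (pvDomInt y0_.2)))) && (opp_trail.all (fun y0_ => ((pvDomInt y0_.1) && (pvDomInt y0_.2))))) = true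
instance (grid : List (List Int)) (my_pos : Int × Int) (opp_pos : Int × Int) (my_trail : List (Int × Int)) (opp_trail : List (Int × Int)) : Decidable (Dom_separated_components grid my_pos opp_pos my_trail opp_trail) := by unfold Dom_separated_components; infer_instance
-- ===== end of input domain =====

-- B replaces A's iterative FIFO BFS worklist by a recursive depth-first flood fill over the
-- same empty-cell region of the 18×20 torus (objective: alternative decomposition, not
-- claimed faster).

-- shared helpers (the Python module's torus_wrap / neighbors, and grid[y][x] cell access)
def pvWrap (p : Int × Int) : Int × Int := (PySem.Int.mod p.1 20, PySem.Int.mod p.2 18)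

def pvNbrs (p : Int × Int) : List (Int × Int) :=
  [(PySem.Int.mod (p.1 + 1) 20, p.2), (PySem.Int.mod (p.1 - 1) 20, p.2),
   (p.1, PySem.Int.mod (p.2 + 1) 18), (p.1, PySem.Int.mod (p.2 - 1) 18)]

-- grid[y][x]; exact wherever the access is in bounds (both coordinates wrapped and nonnegative)
def pvCell (grid : List (List Int)) (c : Int × Int) : Int :=
  PySem.List.pyGetD (PySem.List.pyGetD grid c.2 []) c.1 1

-- cell q (wrapped, nonnegative coordinates) is inside the stored grid
abbrev pvInB (grid : List (List Int)) (q : Int × Int) : Prop :=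
  q.2 < (grid.length : Int) ∧ q.1 < ((PySem.List.pyGetD grid q.2 []).length : Int)

-- ===== PORT A =====
def sepStep (grid : List (List Int)) (st : PySem.Set (Int × Int) × List (Int × Int))
    (nb : Int × Int) : PySem.Set (Int × Int) × List (Int × Int) :=
  let w := pvWrap nb
  if PySem.Set.contains st.1 w then st
  else if pvCell grid w = 0 then (PySem.Set.add st.1 w, st.2 ++ [w]) else st

def sepBFS (grid : List (List Int)) : Nat → List (Int × Int) → PySem.Set (Int × Int) → PySem.Set (Int × Int)
  | 0, _, visited => visited
  | _ + 1, [], visited => visited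
  | fuel + 1, pos :: rest, visited =>
    let st := (pvNbrs pos).foldl (sepStep grid) (visited, [])
    sepBFS grid fuel (rest ++ st.2) st.1

def separated_components (grid : List (List Int)) (my_pos : Int × Int) (opp_pos : Int × Int) (my_trail : List (Int × Int)) (opp_trail : List (Int × Int)) : Bool :=
  let visited := sepBFS grid 2000 [my_pos] (PySem.Set.add PySem.Set.empty (pvWrap my_pos))
  !(PySem.Set.contains visited (pvWrap opp_pos))

-- ===== PORT B =====
def dfsFlood (grid : List (List Int)) : Nat → PySem.Set (Int × Int) → (Int × Int) → PySem.Set (Int × Int)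
  | 0, visited, _ => visited
  | fuel + 1, visited, pos =>
    (pvNbrs pos).foldl (fun vis nb =>
      if PySem.Set.contains vis (pvWrap nb) then vis
      else if pvCell grid (pvWrap nb) = 0 then
        dfsFlood grid fuel (PySem.Set.add vis (pvWrap nb)) (pvWrap nb)
      else vis) visited

def separated_components_alt (grid : List (List Int)) (my_pos : Int × Int) (opp_pos : Int × Int) (my_trail : List (Int × Int)) (opp_trail : List (Int × Int)) : Bool :=
  let visited := dfsFlood grid 2000 (PySem.Set.add PySem.Set.empty (pvWrap my_pos)) my_pos
  !(PySem.Set.contains visited (pvWrap opp_pos))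

-- ===== PRECONDITION & SPEC =====
-- Pre_ is a static sufficient condition for every cell access A can attempt to be in bounds:
-- the wrapped neighbors of the wrapped start are in the grid, and every stored empty torus
-- cell that could possibly be reached (it touches the start or another empty cell) has all
-- its wrapped neighbors in the grid; outside Pre_ A generally raises IndexError, though the
-- closed form necessarily also excludes some returning inputs whose unreachable empty cells
-- sit at the board edge.
def Pre_separated_components (grid : List (List Int)) (my_pos : Int × Int) (opp_pos : Int × Int) (my_trail : List (Int × Int)) (opp_trail : List (Int × Int)) : Prop :=
  (∀ q ∈ (pvNbrs (pvWrap my_pos)).map pvWrap, pvInB grid q) ∧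
  (∀ y ∈ PySem.List.pyRange 0 18 1, ∀ x ∈ PySem.List.pyRange 0 20 1,
    pvInB grid (x, y) → pvCell grid (x, y) = 0 →
    ((x, y) ∈ (pvNbrs (pvWrap my_pos)).map pvWrap ∨
      ∃ n ∈ (pvNbrs (x, y)).map pvWrap, pvCell grid n = 0) →
    ∀ q ∈ (pvNbrs (x, y)).map pvWrap, pvInB grid q)
instance (grid : List (List Int)) (my_pos : Int × Int) (opp_pos : Int × Int) (my_trail : List (Int × Int)) (opp_trail : List (Int × Int)) : Decidable (Pre_separated_components grid my_pos opp_pos my_trail opp_trail) := by unfold Pre_separated_components; infer_instance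

def pvWitness_separated_components : List (List Int) × (Int × Int) × (Int × Int) × (List (Int × Int)) × (List (Int × Int)) :=
  ([[1, 1, 1], [1, 1, 1], [1, 1, 1]], (1, 1), (0, 0), [], [])

def Spec_separated_components (grid : List (List Int)) (my_pos : Int × Int) (opp_pos : Int × Int) (my_trail : List (Int × Int)) (opp_trail : List (Int × Int)) (out : Bool) : Prop := out = separated_components_alt grid my_pos opp_pos my_trail opp_trail
instance (grid : List (List Int)) (my_pos : Int × Int) (opp_pos : Int × Int) (my_trail : List (Int × Int)) (opp_trail : List (Int × Int)) (out : Bool) : Decidable (Spec_separated_components grid my_pos opp_pos my_trail opp_trail out) := by unfold Spec_separated_components; infer_instance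

-- ===== CLAIM (what is proved, stated in full; the proofs are below) =====
def Claim_equal_separated_components : Prop := ∀ (grid : List (List Int)) (my_pos : Int × Int) (opp_pos : Int × Int) (my_trail : List (Int × Int)) (opp_trail : List (Int × Int)), Dom_separated_components grid my_pos opp_pos my_trail opp_trail → Pre_separated_components grid my_pos opp_pos my_trail opp_trail → Spec_separated_components grid my_pos opp_pos my_trail opp_trail (separated_components grid my_pos opp_pos my_trail opp_trail)

-- ===== LEMMAS AND PROOFS =====

-- wrapped coordinates are in range
def pvInR (c : Int × Int) : Prop := 0 ≤ c.1 ∧ c.1 < 20 ∧ 0 ≤ c.2 ∧ c.2 < 18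

theorem pvmod20 (a : Int) : PySem.Int.mod a 20 = a % 20 := PySem.Int.mod_eq_emod_of_pos (by norm_num)
theorem pvmod18 (a : Int) : PySem.Int.mod a 18 = a % 18 := PySem.Int.mod_eq_emod_of_pos (by norm_num)

theorem pvWrap_inR (p : Int × Int) : pvInR (pvWrap p) := by
  simp only [pvWrap, pvInR, pvmod20, pvmod18]; omega

theorem pvWrap_id {p : Int × Int} (h : pvInR p) : pvWrap p = p := by
  obtain ⟨p1, p2⟩ := p
  simp only [pvWrap, pvInR, pvmod20, pvmod18, Prod.mk.injEq] at *
  omega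

theorem map_wrap_nbrs_wrap (p : Int × Int) :
    (pvNbrs (pvWrap p)).map pvWrap = (pvNbrs p).map pvWrap := by
  obtain ⟨p1, p2⟩ := p
  simp only [pvNbrs, pvWrap, pvmod20, pvmod18, List.map_cons, List.map_nil, List.cons.injEq,
    Prod.mk.injEq, and_true]
  omega

-- the 360 cells of the full 18x20 torus (proof-side: bounds the size of the visited sets)
def pvCells : List (Int × Int) :=
  (PySem.List.pyRange 0 18 1).flatMap (fun y => (PySem.List.pyRange 0 20 1).map (fun x => (x, y)))

theorem mem_pvCells {c : Int × Int} : c ∈ pvCells ↔ pvInR c := by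
  obtain ⟨c1, c2⟩ := c
  simp only [pvCells, pvInR, List.mem_flatMap, List.mem_map, PySem.List.mem_pyRange_one,
    Prod.mk.injEq]
  constructor
  · rintro ⟨y, hy, x, hx, rfl, rfl⟩; exact ⟨hx.1, hx.2, hy.1, hy.2⟩
  · rintro ⟨h1, h2, h3, h4⟩; exact ⟨c2, ⟨h3, h4⟩, c1, ⟨h1, h2⟩, rfl, rfl⟩

set_option maxRecDepth 4096 in
theorem length_pvCells : pvCells.length = 360 := by decide

theorem pv_length_le_360 {l : List (Int × Int)} (hn : l.Nodup) (hr : ∀ x ∈ l, pvInR x) :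
    l.length ≤ 360 := by
  have hsub : l ⊆ pvCells := fun x hx => mem_pvCells.mpr (hr x hx)
  have h := List.Subperm.length_le (List.subperm_of_subset hn hsub)
  rw [length_pvCells] at h
  exact h

-- reachability: wrap(my_pos) itself, plus empty cells adjacent (wrapped) to a reachable cell
inductive pvReach (grid : List (List Int)) (s : Int × Int) : (Int × Int) → Prop where
  | base : pvReach grid s s
  | step {p q : Int × Int} : pvReach grid s p → q ∈ (pvNbrs p).map pvWrap →
      pvCell grid q = 0 → pvReach grid s q

def pvClosed (grid : List (List Int)) (F : List (Int × Int)) : Prop :=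
  ∀ p ∈ F, ∀ q ∈ (pvNbrs p).map pvWrap, pvCell grid q = 0 → q ∈ F

theorem reach_mem_of_closed {grid : List (List Int)} {s : Int × Int} {F : List (Int × Int)}
    (hs : s ∈ F) (hc : pvClosed grid F) : ∀ p, pvReach grid s p → p ∈ F := by
  intro p h
  induction h with
  | base => exact hs
  | step _ hq hcell ih => exact hc _ ih _ hq hcell

-- A-side: one popped position's neighbor scan
theorem sepFold_exists (grid : List (List Int)) (nbs : List (Int × Int)) :
    ∀ (visited acc : List (Int × Int)), ∃ new : List (Int × Int),
      (nbs.foldl (sepStep grid) (visited, acc)).1 = visited ++ new ∧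
      (nbs.foldl (sepStep grid) (visited, acc)).2 = acc ++ new ∧
      new.Nodup ∧
      (∀ w ∈ new, w ∉ visited ∧ pvCell grid w = 0 ∧ ∃ nb ∈ nbs, w = pvWrap nb) ∧
      (∀ nb ∈ nbs, pvCell grid (pvWrap nb) = 0 → pvWrap nb ∈ visited ++ new) := by
  induction nbs with
  | nil => intro visited acc; exact ⟨[], by simp, by simp, by simp, by simp, by simp⟩
  | cons nb nbs ih =>
    intro visited acc
    by_cases hw : pvWrap nb ∈ visited
    · have hstep : sepStep grid (visited, acc) nb = (visited, acc) := by
        simp [sepStep, PySem.Set.contains_iff, hw]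
      obtain ⟨new, h1, h2, h3, h4, h5⟩ := ih visited acc
      refine ⟨new, by simpa [hstep] using h1, by simpa [hstep] using h2, h3, ?_, ?_⟩
      · intro w hwn
        obtain ⟨ha, hb, nb', hnb', rfl⟩ := h4 w hwn
        exact ⟨ha, hb, nb', List.mem_cons_of_mem _ hnb', rfl⟩
      · intro nb' hnb' hc
        rcases List.mem_cons.mp hnb' with rfl | hnb'
        · exact List.mem_append_left _ hw
        · exact h5 nb' hnb' hc
    · by_cases hcell : pvCell grid (pvWrap nb) = 0
      · have hstep : sepStep grid (visited, acc) nb = (visited ++ [pvWrap nb], acc ++ [pvWrap nb]) := by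
          simp [sepStep, hw, hcell, PySem.Set.add_of_not_mem hw]
        obtain ⟨new, h1, h2, h3, h4, h5⟩ := ih (visited ++ [pvWrap nb]) (acc ++ [pvWrap nb])
        refine ⟨pvWrap nb :: new, ?_, ?_, ?_, ?_, ?_⟩
        · simpa [hstep, List.append_assoc] using h1
        · simpa [hstep, List.append_assoc] using h2
        · exact List.nodup_cons.mpr ⟨fun hmem => (h4 _ hmem).1 (by simp), h3⟩
        · intro w hwn
          rcases List.mem_cons.mp hwn with rfl | hwn
          · exact ⟨hw, hcell, nb, List.mem_cons_self, rfl⟩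
          · obtain ⟨ha, hb, nb', hnb', rfl⟩ := h4 w hwn
            refine ⟨fun hx => ha (by simp [hx]), hb, nb', List.mem_cons_of_mem _ hnb', rfl⟩
        · intro nb' hnb' hc
          rcases List.mem_cons.mp hnb' with rfl | hnb'
          · simp
          · have := h5 nb' hnb' hc
            simpa [List.append_assoc] using this
      · have hstep : sepStep grid (visited, acc) nb = (visited, acc) := by
          simp [sepStep, hw, hcell]
        obtain ⟨new, h1, h2, h3, h4, h5⟩ := ih visited acc
        refine ⟨new, by simpa [hstep] using h1, by simpa [hstep] using h2, h3, ?_, ?_⟩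
        · intro w hwn
          obtain ⟨ha, hb, nb', hnb', rfl⟩ := h4 w hwn
          exact ⟨ha, hb, nb', List.mem_cons_of_mem _ hnb', rfl⟩
        · intro nb' hnb' hc
          rcases List.mem_cons.mp hnb' with rfl | hnb'
          · exact absurd hc hcell
          · exact h5 nb' hnb' hc

-- A-side: the whole BFS
theorem bfs_main (grid : List (List Int)) (s : Int × Int) :
    ∀ (fuel : Nat) (queue visited : List (Int × Int)),
      visited.Nodup → (∀ p ∈ visited, pvInR p) → s ∈ visited →
      (∀ p ∈ visited, pvReach grid s p) →
      (∀ p ∈ queue, pvWrap p ∈ visited) →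
      (∀ p ∈ visited, (∀ q ∈ (pvNbrs p).map pvWrap, pvCell grid q = 0 → q ∈ visited) ∨
        ∃ r ∈ queue, pvWrap r = p) →
      queue.length + 4 * (360 - visited.length) < fuel →
      (∀ p ∈ visited, p ∈ sepBFS grid fuel queue visited) ∧
      (∀ p ∈ sepBFS grid fuel queue visited, pvReach grid s p) ∧
      pvClosed grid (sepBFS grid fuel queue visited) := by
  intro fuel
  induction fuel with
  | zero => intro queue visited _ _ _ _ _ _ hm; omega
  | succ fuel ih =>
    intro queue visited hnd hinR hs hreach hq hcq hm
    match queue with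
    | [] =>
      simp only [sepBFS]
      refine ⟨fun p hp => hp, hreach, ?_⟩
      intro p hp q hqm hc
      rcases hcq p hp with hcl | ⟨r, hr, _⟩
      · exact hcl q hqm hc
      · exact absurd hr (List.not_mem_nil)
    | pos :: rest =>
      obtain ⟨new, h1, h2, h3, h4, h5⟩ := sepFold_exists grid (pvNbrs pos) visited []
      have h2' : ((pvNbrs pos).foldl (sepStep grid) (visited, [])).2 = new := by simpa using h2
      have hnd' : (visited ++ new).Nodup :=
        List.nodup_append.mpr ⟨hnd, h3, fun a ha b hb heq => (h4 b hb).1 (heq ▸ ha)⟩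
      have hinR' : ∀ p ∈ visited ++ new, pvInR p := by
        intro p hp
        rcases List.mem_append.mp hp with hp | hp
        · exact hinR p hp
        · obtain ⟨_, _, nb, _, rfl⟩ := h4 p hp
          exact pvWrap_inR nb
      have hs' : s ∈ visited ++ new := List.mem_append_left _ hs
      have hreach' : ∀ p ∈ visited ++ new, pvReach grid s p := by
        intro p hp
        rcases List.mem_append.mp hp with hp | hp
        · exact hreach p hp
        · obtain ⟨_, hcell, nb, hnb, rfl⟩ := h4 p hp
          have hposvis : pvWrap pos ∈ visited := hq pos List.mem_cons_self
          refine pvReach.step (hreach _ hposvis) ?_ hcell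
          rw [map_wrap_nbrs_wrap]
          exact List.mem_map_of_mem hnb
      have hq' : ∀ r ∈ rest ++ new, pvWrap r ∈ visited ++ new := by
        intro r hr
        rcases List.mem_append.mp hr with hr | hr
        · exact List.mem_append_left _ (hq r (List.mem_cons_of_mem _ hr))
        · obtain ⟨_, _, nb, _, rfl⟩ := h4 r hr
          rw [pvWrap_id (pvWrap_inR nb)]
          exact List.mem_append_right _ hr
      have hcq' : ∀ p ∈ visited ++ new,
          (∀ q ∈ (pvNbrs p).map pvWrap, pvCell grid q = 0 → q ∈ visited ++ new) ∨
          ∃ r ∈ rest ++ new, pvWrap r = p := by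
        intro p hp
        rcases List.mem_append.mp hp with hp | hp
        · rcases hcq p hp with hcl | ⟨r, hr, hwr⟩
          · exact Or.inl fun q hqm hc => List.mem_append_left _ (hcl q hqm hc)
          · rcases List.mem_cons.mp hr with rfl | hr'
            · subst hwr
              refine Or.inl ?_
              intro q hqm hc
              rw [map_wrap_nbrs_wrap] at hqm
              obtain ⟨nb, hnb, rfl⟩ := List.mem_map.mp hqm
              exact h5 nb hnb hc
            · exact Or.inr ⟨r, List.mem_append_left _ hr', hwr⟩
        · obtain ⟨_, _, nb, _, rfl⟩ := h4 p hp
          exact Or.inr ⟨pvWrap nb, List.mem_append_right _ hp, pvWrap_id (pvWrap_inR nb)⟩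
      have hlen : (visited ++ new).length ≤ 360 := pv_length_le_360 hnd' hinR'
      have hm' : (rest ++ new).length + 4 * (360 - (visited ++ new).length) < fuel := by
        simp only [List.length_append, List.length_cons] at hm hlen ⊢
        omega
      have hred : sepBFS grid (fuel + 1) (pos :: rest) visited =
          sepBFS grid fuel (rest ++ new) (visited ++ new) := by
        simp only [sepBFS]
        rw [h1, h2']
      obtain ⟨ihsub, ihsound, ihclosed⟩ := ih (rest ++ new) (visited ++ new)
        hnd' hinR' hs' hreach' hq' hcq' hm'
      rw [hred]
      exact ⟨fun p hp => ihsub p (List.mem_append_left _ hp), ihsound, ihclosed⟩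

-- B-side: the recursive flood fill
theorem dfs_main (grid : List (List Int)) (s : Int × Int) :
    ∀ (fuel : Nat) (visited : List (Int × Int)) (pos : Int × Int),
      visited.Nodup → (∀ p ∈ visited, pvInR p) → s ∈ visited →
      (∀ p ∈ visited, pvReach grid s p) →
      pvWrap pos ∈ visited →
      360 - visited.length < fuel →
      ∃ new : List (Int × Int),
        dfsFlood grid fuel visited pos = visited ++ new ∧
        (visited ++ new).Nodup ∧
        (∀ p ∈ new, pvInR p ∧ pvReach grid s p) ∧
        (∀ q ∈ (pvNbrs pos).map pvWrap, pvCell grid q = 0 → q ∈ visited ++ new) ∧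
        (∀ w ∈ new, ∀ q ∈ (pvNbrs w).map pvWrap, pvCell grid q = 0 → q ∈ visited ++ new) := by
  intro fuel
  induction fuel with
  | zero =>
    intro visited pos hnd hinR _ _ _ hm
    have := pv_length_le_360 hnd hinR
    omega
  | succ fuel ih =>
    intro visited pos hnd hinR hs hsound hposmem hm
    have inner : ∀ (nbs : List (Int × Int)) (vis : List (Int × Int)),
        vis.Nodup → (∀ p ∈ vis, pvInR p) → s ∈ vis →
        (∀ p ∈ vis, pvReach grid s p) →
        pvWrap pos ∈ vis → visited.length ≤ vis.length →
        (∀ nb ∈ nbs, pvWrap nb ∈ (pvNbrs (pvWrap pos)).map pvWrap) →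
        ∃ new : List (Int × Int),
          (nbs.foldl (fun vis nb =>
            if PySem.Set.contains vis (pvWrap nb) then vis
            else if pvCell grid (pvWrap nb) = 0 then
              dfsFlood grid fuel (PySem.Set.add vis (pvWrap nb)) (pvWrap nb)
            else vis) vis) = vis ++ new ∧
          (vis ++ new).Nodup ∧
          (∀ p ∈ new, pvInR p ∧ pvReach grid s p) ∧
          (∀ nb ∈ nbs, pvCell grid (pvWrap nb) = 0 → pvWrap nb ∈ vis ++ new) ∧
          (∀ w ∈ new, ∀ q ∈ (pvNbrs w).map pvWrap, pvCell grid q = 0 → q ∈ vis ++ new) := by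
      intro nbs
      induction nbs with
      | nil =>
        intro vis hnd' hinR' hs' hsound' hposmem' hlen' _
        exact ⟨[], by simp, by simpa using hnd', by simp, by simp, by simp⟩
      | cons nb nbs ihn =>
        intro vis hnd' hinR' hs' hsound' hposmem' hlen' hnb
        rw [List.foldl_cons]
        by_cases hw : pvWrap nb ∈ vis
        · rw [if_pos ((PySem.Set.contains_iff _ _).mpr hw)]
          obtain ⟨new, e1, e2, e3, e4, e5⟩ := ihn vis hnd' hinR' hs' hsound' hposmem' hlen'
            (fun nb' h => hnb nb' (List.mem_cons_of_mem _ h))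
          refine ⟨new, e1, e2, e3, ?_, e5⟩
          intro nb' hnb' hc
          rcases List.mem_cons.mp hnb' with rfl | hnb'
          · exact List.mem_append_left _ hw
          · exact e4 nb' hnb' hc
        · rw [if_neg (by simp [hw])]
          by_cases hcell : pvCell grid (pvWrap nb) = 0
          · rw [if_pos hcell, PySem.Set.add_of_not_mem hw]
            have hwinR : pvInR (pvWrap nb) := pvWrap_inR nb
            have hreachw : pvReach grid s (pvWrap nb) :=
              pvReach.step (hsound' _ hposmem') (hnb nb List.mem_cons_self) hcell
            have hnd2 : (vis ++ [pvWrap nb]).Nodup :=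
              List.nodup_append.mpr ⟨hnd', List.nodup_singleton _, by
                intro a ha b hb
                simp at hb; subst hb
                intro heq; exact hw (heq ▸ ha)⟩
            have hinR2 : ∀ p ∈ vis ++ [pvWrap nb], pvInR p := by
              intro p hp
              rcases List.mem_append.mp hp with hp | hp
              · exact hinR' p hp
              · simp at hp; subst hp; exact hwinR
            have hsound2 : ∀ p ∈ vis ++ [pvWrap nb], pvReach grid s p := by
              intro p hp
              rcases List.mem_append.mp hp with hp | hp
              · exact hsound' p hp
              · simp at hp; subst hp; exact hreachw
            have hlen361 : (vis ++ [pvWrap nb]).length ≤ 360 := pv_length_le_360 hnd2 hinR2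
            have hm2 : 360 - (vis ++ [pvWrap nb]).length < fuel := by
              simp only [List.length_append, List.length_cons, List.length_nil] at hlen361 ⊢
              omega
            have hwrapfix : pvWrap (pvWrap nb) = pvWrap nb := pvWrap_id hwinR
            obtain ⟨new1, f1, f2, f3, f4, f5⟩ := ih (vis ++ [pvWrap nb]) (pvWrap nb)
              hnd2 hinR2 (List.mem_append_left _ hs') hsound2
              (by rw [hwrapfix]; exact List.mem_append_right _ (by simp)) hm2
            obtain ⟨new2, g1, g2, g3, g4, g5⟩ := ihn ((vis ++ [pvWrap nb]) ++ new1)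
              f2
              (by
                intro p hp
                rcases List.mem_append.mp hp with hp | hp
                · exact hinR2 p hp
                · exact (f3 p hp).1)
              (List.mem_append_left _ (List.mem_append_left _ hs'))
              (by
                intro p hp
                rcases List.mem_append.mp hp with hp | hp
                · exact hsound2 p hp
                · exact (f3 p hp).2)
              (List.mem_append_left _ (List.mem_append_left _ hposmem'))
              (by simp only [List.length_append]; omega)
              (fun nb' h => hnb nb' (List.mem_cons_of_mem _ h))
            refine ⟨[pvWrap nb] ++ new1 ++ new2, ?_, ?_, ?_, ?_, ?_⟩
            · rw [f1, g1]
              simp [List.append_assoc]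
            · simpa [List.append_assoc] using g2
            · intro p hp
              simp only [List.append_assoc, List.mem_append, List.mem_singleton] at hp
              rcases hp with rfl | hp | hp
              · exact ⟨hwinR, hreachw⟩
              · exact f3 p hp
              · exact g3 p hp
            · intro nb' hnb' hc
              rcases List.mem_cons.mp hnb' with rfl | hnb'
              · simp
              · have := g4 nb' hnb' hc
                simp only [List.mem_append] at this ⊢
                tauto
            · intro w hw' q hq hc
              simp only [List.mem_append, List.mem_singleton] at hw'
              rcases hw' with (rfl | hw') | hw'
              · have := f4 q hq hc
                simp only [List.mem_append] at this ⊢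
                tauto
              · have := f5 w hw' q hq hc
                simp only [List.mem_append] at this ⊢
                tauto
              · have := g5 w hw' q hq hc
                simp only [List.mem_append] at this ⊢
                tauto
          · rw [if_neg hcell]
            obtain ⟨new, e1, e2, e3, e4, e5⟩ := ihn vis hnd' hinR' hs' hsound' hposmem' hlen'
              (fun nb' h => hnb nb' (List.mem_cons_of_mem _ h))
            refine ⟨new, e1, e2, e3, ?_, e5⟩
            intro nb' hnb' hc
            rcases List.mem_cons.mp hnb' with rfl | hnb'
            · exact absurd hc hcell
            · exact e4 nb' hnb' hc
    obtain ⟨new, e1, e2, e3, e4, e5⟩ := inner (pvNbrs pos) visited hnd hinR hs hsound hposmem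
      le_rfl (by
        intro nb h
        rw [map_wrap_nbrs_wrap]
        exact List.mem_map_of_mem h)
    exact ⟨new, by simpa [dfsFlood] using e1, e2, e3,
      (by
        intro q hq hc
        obtain ⟨nb, hnb, rfl⟩ := List.mem_map.mp hq
        exact e4 nb hnb hc), e5⟩

theorem contains_congr_pv (l₁ l₂ : List (Int × Int)) (x : Int × Int)
    (h : ∀ y, y ∈ l₁ ↔ y ∈ l₂) : PySem.Set.contains l₁ x = PySem.Set.contains l₂ x := by
  cases hb1 : PySem.Set.contains l₁ x <;> cases hb2 : PySem.Set.contains l₂ x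
  · rfl
  · have hx : x ∈ l₁ := (h x).mpr ((PySem.Set.contains_iff _ _).mp hb2)
    rw [(PySem.Set.contains_iff _ _).mpr hx] at hb1
    exact hb1.symm
  · have hx : x ∈ l₂ := (h x).mp ((PySem.Set.contains_iff _ _).mp hb1)
    rw [(PySem.Set.contains_iff _ _).mpr hx] at hb2
    exact hb2
  · rfl

theorem separated_components_spec : Claim_equal_separated_components := by
  intro grid my_pos opp_pos my_trail opp_trail _hdom _hpre
  simp only [Spec_separated_components, separated_components, separated_components_alt]
  have hinit : PySem.Set.add PySem.Set.empty (pvWrap my_pos) = [pvWrap my_pos] :=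
    PySem.Set.add_of_not_mem (List.not_mem_nil)
  rw [hinit]
  obtain ⟨hsubA, hsoundA, hclosedA⟩ :=
    bfs_main grid (pvWrap my_pos) 2000 [my_pos] [pvWrap my_pos]
      (by simp)
      (by intro p hp; simp at hp; subst hp; exact pvWrap_inR my_pos)
      (by simp)
      (by intro p hp; simp at hp; subst hp; exact pvReach.base)
      (by intro p hp; simp at hp; subst hp; simp)
      (by intro p hp; simp at hp; subst hp; exact Or.inr ⟨my_pos, by simp, rfl⟩)
      (by simp)
  obtain ⟨newB, b1, b2, b3, b4, b5⟩ :=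
    dfs_main grid (pvWrap my_pos) 2000 [pvWrap my_pos] my_pos
      (by simp)
      (by intro p hp; simp at hp; subst hp; exact pvWrap_inR my_pos)
      (by simp)
      (by intro p hp; simp at hp; subst hp; exact pvReach.base)
      (by simp)
      (by norm_num)
  have hsB : pvWrap my_pos ∈ dfsFlood grid 2000 [pvWrap my_pos] my_pos := by
    rw [b1]; exact List.mem_append_left _ (by simp)
  have hsoundB : ∀ p ∈ dfsFlood grid 2000 [pvWrap my_pos] my_pos, pvReach grid (pvWrap my_pos) p := by
    intro p hp
    rw [b1] at hp
    rcases List.mem_append.mp hp with hp | hp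
    · simp at hp; subst hp; exact pvReach.base
    · exact (b3 p hp).2
  have hclosedB : pvClosed grid (dfsFlood grid 2000 [pvWrap my_pos] my_pos) := by
    intro p hp q hq hc
    rw [b1] at hp ⊢
    rcases List.mem_append.mp hp with hp | hp
    · simp at hp; subst hp
      rw [map_wrap_nbrs_wrap] at hq
      exact b4 q hq hc
    · exact b5 p hp q hq hc
  have hsA : pvWrap my_pos ∈ sepBFS grid 2000 [my_pos] [pvWrap my_pos] :=
    hsubA _ (by simp)
  have hiff : ∀ x, x ∈ sepBFS grid 2000 [my_pos] [pvWrap my_pos] ↔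
      x ∈ dfsFlood grid 2000 [pvWrap my_pos] my_pos := fun x =>
    ⟨fun hx => reach_mem_of_closed hsB hclosedB x (hsoundA x hx),
     fun hx => reach_mem_of_closed hsA hclosedA x (hsoundB x hx)⟩
  rw [contains_congr_pv _ _ (pvWrap opp_pos) hiff]
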